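-- pv_equiv track=rewrite | github.com/ArmedGuy/Snek | snek/processors/postgres_processor.py | _escapeName
-- ===== SOURCE A (Python) =====
-- def _escapeName(name):
--     if name == "*":
--         return name
--     ret = []
--     if "." in name:
--         parts = name.split('.')
--         for part in parts:
--             ret.append("\"%s\"" % part)
--     else:
--         ret.append("\"%s\"" % name)
--     return ".".join(ret)
-- ===== SOURCE B (Python) =====
-- def _escapeName(name):
--     if name == "*":
--         return name
--     return '"%s"' % name.replace('.', '"."')
-- ===== Notes on version B (the rewrite author's own statement) =====
-- stated objective: idiomatic
-- what changed: Replaced the split-loop-append-join over dot-separated parts by a single string substitution: wrap the whole name in quotes and rewrite each interior dot to quote-dot-quote via str.replace.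
import Mathlib
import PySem

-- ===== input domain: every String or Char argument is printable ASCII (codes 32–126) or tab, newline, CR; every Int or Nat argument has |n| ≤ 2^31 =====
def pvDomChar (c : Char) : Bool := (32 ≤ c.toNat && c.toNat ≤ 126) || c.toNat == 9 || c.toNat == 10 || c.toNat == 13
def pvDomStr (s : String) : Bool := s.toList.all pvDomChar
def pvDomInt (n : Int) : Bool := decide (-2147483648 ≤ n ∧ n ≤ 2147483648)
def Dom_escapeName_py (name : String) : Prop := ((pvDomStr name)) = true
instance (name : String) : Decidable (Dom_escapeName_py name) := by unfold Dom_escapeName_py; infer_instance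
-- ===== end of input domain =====

-- B drops the split/loop/join: it wraps the whole name in quotes and rewrites each
-- interior dot to quote-dot-quote with one str.replace (same output, more idiomatic).

-- ===== PORT A =====
-- name.split('.') with the nonempty literal separator ".": PySem.Str.split? is `some`
-- there, so `.getD []` is exact.
def escapeName_py (name : String) : String :=
  if name == "*" then name
  else
    let ret : List String :=
      if PySem.Str.isIn "." name then
        ((PySem.Str.split? name ".").getD []).foldl
          (fun acc part => acc ++ ["\"" ++ part ++ "\""]) []
      else
        [] ++ ["\"" ++ name ++ "\""]
    PySem.Str.join "." ret

-- ===== PORT B =====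
def escapeName_py_alt (name : String) : String :=
  if name == "*" then name
  else "\"" ++ PySem.Str.replace name "." "\".\"" ++ "\""

-- ===== PRECONDITION & SPEC =====
def Spec_escapeName_py (name : String) (out : String) : Prop := out = escapeName_py_alt name
instance (name : String) (out : String) : Decidable (Spec_escapeName_py name out) := by unfold Spec_escapeName_py; infer_instance

-- ===== CLAIM (what is proved, stated in full; the proofs are below) =====
def Claim_equal_escapeName_py : Prop := ∀ (name : String), Dom_escapeName_py name → Spec_escapeName_py name (escapeName_py name)

-- ===== LEMMAS AND PROOFS =====

/-- `'"' :: p ++ ['"']`: the quoted form of one part. -/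
def pvQuote (p : List Char) : List Char := '"' :: p ++ ['"']

/-- What `replace` does to one character when old = `['.']`. -/
def pvF (new : List Char) (c : Char) : List Char := if c = '.' then new else [c]

/-- Simple structural model of `split('.')`. -/
def pvSplitDot : List Char → List (List Char)
  | [] => [[]]
  | c :: t =>
    if c = '.' then [] :: pvSplitDot t
    else (c :: (pvSplitDot t).headI) :: (pvSplitDot t).tail

lemma pv_cons_headI_tail {α : Type} [Inhabited α] {l : List α} (h : l ≠ []) :
    l.headI :: l.tail = l := by
  cases l with
  | nil => exact absurd rfl h
  | cons a t => rfl

lemma pvSplitDot_ne_nil : ∀ cs : List Char, pvSplitDot cs ≠ [] := by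
  intro cs
  cases cs with
  | nil => simp [pvSplitDot]
  | cons c t => by_cases h : c = '.' <;> simp [pvSplitDot, h]

lemma pv_replace_go (new : List Char) :
    ∀ (l : List Char) (fuel : Nat) (acc : List Char), l.length ≤ fuel →
      PySem.Chars.replace.go ['.'] new fuel l acc
        = acc.reverse ++ l.flatMap (pvF new) := by
  intro l
  induction l with
  | nil =>
    intro fuel acc _
    cases fuel <;> simp [PySem.Chars.replace.go]
  | cons c t ih =>
    intro fuel acc hlen
    cases fuel with
    | zero => simp at hlen
    | succ f =>
      by_cases h : c = '.'
      · subst h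
        simp only [PySem.Chars.replace.go, List.isPrefixOf, BEq.rfl, Bool.true_and, if_pos]
        rw [show List.drop (['.'] : List Char).length ('.' :: t) = t from rfl]
        rw [ih f (new.reverse ++ acc) (by simpa using Nat.succ_le_succ_iff.mp hlen)]
        simp [pvF]
      · simp only [PySem.Chars.replace.go]
        rw [if_neg (by simp [List.isPrefixOf]; intro hh; exact h hh.symm)]
        rw [ih f (c :: acc) (by simpa using Nat.succ_le_succ_iff.mp hlen)]
        simp [pvF, h]

lemma pv_replace_eq (cs new : List Char) :
    PySem.Chars.replace cs ['.'] new = cs.flatMap (pvF new) := by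
  unfold PySem.Chars.replace
  rw [if_neg (by simp)]
  simpa using pv_replace_go new cs cs.length [] (le_refl _)

lemma pv_splitOn_go :
    ∀ (l : List Char) (fuel : Nat) (cur : List Char) (acc : List (List Char)),
      l.length ≤ fuel →
      PySem.Chars.splitOn.go ['.'] fuel l cur acc
        = acc.reverse ++ (cur.reverse ++ (pvSplitDot l).headI) :: (pvSplitDot l).tail := by
  intro l
  induction l with
  | nil =>
    intro fuel cur acc _
    cases fuel <;> simp [PySem.Chars.splitOn.go, pvSplitDot]
  | cons c t ih =>
    intro fuel cur acc hlen
    cases fuel with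
    | zero => simp at hlen
    | succ f =>
      by_cases h : c = '.'
      · subst h
        simp only [PySem.Chars.splitOn.go, List.isPrefixOf, BEq.rfl, Bool.true_and, if_pos]
        rw [show List.drop (['.'] : List Char).length ('.' :: t) = t from rfl]
        rw [ih f [] (cur.reverse :: acc) (by simpa using Nat.succ_le_succ_iff.mp hlen)]
        simp [pvSplitDot, pv_cons_headI_tail (pvSplitDot_ne_nil t)]
      · simp only [PySem.Chars.splitOn.go]
        rw [if_neg (by simp [List.isPrefixOf]; intro hh; exact h hh.symm)]
        rw [ih f (c :: cur) acc (by simpa using Nat.succ_le_succ_iff.mp hlen)]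
        simp [pvSplitDot, h]

lemma pv_splitOn_eq (cs : List Char) :
    PySem.Chars.splitOn cs ['.'] = pvSplitDot cs := by
  unfold PySem.Chars.splitOn
  rw [pv_splitOn_go cs (cs.length + 1) [] [] (Nat.le_succ _)]
  simpa using pv_cons_headI_tail (pvSplitDot_ne_nil cs)

lemma pv_join_shift (sep p q : List Char) (xs : List (List Char)) :
    PySem.Chars.join sep ((p ++ q) :: xs) = p ++ PySem.Chars.join sep (q :: xs) := by
  cases xs with
  | nil => rw [PySem.Chars.join_singleton, PySem.Chars.join_singleton]
  | cons b t =>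
    simp [PySem.Chars.join, List.intercalate, List.intersperse, List.flatten,
      List.append_assoc]

lemma pv_main (cs : List Char) :
    PySem.Chars.join ['.'] ((pvSplitDot cs).map pvQuote)
      = '"' :: cs.flatMap (pvF ['"', '.', '"']) ++ ['"'] := by
  induction cs with
  | nil => simp [pvSplitDot, pvQuote, PySem.Chars.join_singleton]
  | cons c t ih =>
    by_cases h : c = '.'
    · subst h
      have hne : (pvSplitDot t).map pvQuote ≠ [] := by
        simpa using pvSplitDot_ne_nil t
      obtain ⟨b, xs, hb⟩ := List.exists_cons_of_ne_nil hne
      rw [show pvSplitDot ('.' :: t) = [] :: pvSplitDot t from by simp [pvSplitDot],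
        List.map_cons]
      rw [hb] at ih ⊢
      rw [show pvQuote [] = ['"'] ++ ['"'] from rfl, pv_join_shift,
        show PySem.Chars.join ['.'] (['"'] :: b :: xs)
          = ['"'] ++ ['.'] ++ PySem.Chars.join ['.'] (b :: xs) from by
            simp [PySem.Chars.join, List.intercalate, List.intersperse], ih]
      simp [pvF]
    · have hr := pv_cons_headI_tail (pvSplitDot_ne_nil t)
      rw [show pvSplitDot (c :: t)
          = (c :: (pvSplitDot t).headI) :: (pvSplitDot t).tail from by simp [pvSplitDot, h],
        List.map_cons]
      rw [← hr, List.map_cons] at ih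
      rw [show pvQuote ((pvSplitDot t).headI) = ['"'] ++ ((pvSplitDot t).headI ++ ['"'])
        from by simp [pvQuote], pv_join_shift] at ih
      rw [show pvQuote (c :: (pvSplitDot t).headI)
          = ['"', c] ++ ((pvSplitDot t).headI ++ ['"']) from by simp [pvQuote],
        pv_join_shift]
      have hx : PySem.Chars.join ['.']
          (((pvSplitDot t).headI ++ ['"']) :: ((pvSplitDot t).tail.map pvQuote))
          = t.flatMap (pvF ['"', '.', '"']) ++ ['"'] := by
        have := ih
        simpa using this
      rw [hx]
      simp [pvF, h]

lemma pv_foldl_quote (parts : List String) :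
    ∀ acc : List String,
      parts.foldl (fun acc part => acc ++ ["\"" ++ part ++ "\""]) acc
        = acc ++ parts.map (fun part => "\"" ++ part ++ "\"") := by
  induction parts with
  | nil => intro acc; simp
  | cons p t ih => intro acc; simp [ih]

lemma pv_no_dot (cs : List Char) (h : '.' ∉ cs) :
    cs.flatMap (pvF ['"', '.', '"']) = cs := by
  induction cs with
  | nil => simp
  | cons c t ih =>
    simp only [List.mem_cons, not_or] at h
    simp [pvF, Ne.symm h.1, ih h.2]

lemma pv_isIn_false (name : String) (h : PySem.Str.isIn "." name = false) :
    '.' ∉ name.toList := by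
  rw [PySem.Str.isIn_eq] at h
  unfold PySem.Chars.isIn at h
  have hfind : PySem.Chars.find name.toList ['.'] = -1 := by
    by_contra hne
    simp [bne, hne] at h
  intro hmem
  have hinfix : (['.'] : List Char) <:+: name.toList := by
    obtain ⟨s, t, hst⟩ := List.append_of_mem hmem
    exact ⟨s, t, by simp [hst]⟩
  have h0 : PySem.Chars.findFrom name.toList ['.'] ((0 : Nat) : Int) = -1 := by
    rw [Nat.cast_zero, PySem.Chars.findFrom_zero]; exact hfind
  have h1 : ¬ (['.'] : List Char) <:+: List.drop 0 name.toList :=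
    (PySem.Chars.findFrom_natCast_eq_neg_one_iff _ _ 0 (Nat.zero_le _)).mp h0
  exact h1 (by simpa using hinfix)

lemma pv_toList_quoteStr (p : String) :
    ("\"" ++ p ++ "\"").toList = pvQuote p.toList := by
  simp [pvQuote, String.toList_append]

-- ===== VERDICT (by name: the statement is the Claim_ definition above) =====
theorem escapeName_py_spec : Claim_equal_escapeName_py := by
  intro name _
  unfold Spec_escapeName_py escapeName_py escapeName_py_alt
  by_cases hstar : name == "*"
  · simp [hstar]
  · simp only [hstar, if_false, Bool.false_eq_true]
    rw [← String.toList_inj]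
    rw [String.toList_append, String.toList_append, PySem.Str.toList_replace]
    rw [show ("\"" : String).toList = ['"'] from rfl,
      show ("." : String).toList = ['.'] from rfl,
      show ("\".\"" : String).toList = ['"', '.', '"'] from rfl]
    rw [pv_replace_eq]
    by_cases hdot : PySem.Str.isIn "." name
    · -- dotted branch: split, quote each part, join
      simp only [hdot, if_pos]
      have hsplit : PySem.Str.split? name "." ≠ none := by
        intro hnone
        have := PySem.Str.split?_map name "."
        rw [hnone] at this
        simp [PySem.Chars.split?] at this
      obtain ⟨parts, hparts⟩ := Option.ne_none_iff_exists'.mp hsplit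
      have hmap : parts.map String.toList = PySem.Chars.splitOn name.toList ['.'] := by
        have := PySem.Str.split?_map name "."
        rw [hparts] at this
        simpa [PySem.Chars.split?] using this
      rw [hparts]
      simp only [Option.getD_some]
      rw [pv_foldl_quote parts [], List.nil_append]
      rw [PySem.Str.toList_join, List.map_map,
        show ("." : String).toList = ['.'] from rfl]
      have hq : (List.map (String.toList ∘ fun part => "\"" ++ part ++ "\"") parts)
          = (parts.map String.toList).map pvQuote := by
        rw [List.map_map]
        exact List.map_congr_left fun p _ => pv_toList_quoteStr p
      rw [hq, hmap, pv_splitOn_eq, pv_main]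
      simp
    · -- dotless branch: one quoted part
      simp only [hdot, Bool.false_eq_true, if_false, List.nil_append]
      rw [PySem.Str.toList_join, List.map_cons, List.map_nil,
        PySem.Chars.join_singleton, pv_toList_quoteStr]
      rw [pv_no_dot name.toList (pv_isIn_false name (by simpa using hdot))]
      simp [pvQuote]
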